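-- pv_equiv track=rewrite | github.com/Xingyu-Xiao/Memo-of-Introduction-to-Computer-Science- | 题目总纲/每日选做/codeforce/Kousuke's Assignment.py | max_beautiful_segments
-- ===== SOURCE A (Python) =====
-- def max_beautiful_segments(n, a):
--     prefix_sum = 0
--     prefix_map = set()
--     prefix_map.add(0)
--     count = 0
--     for i in range(1, n+1):
--         prefix_sum += a[i-1]
--         if prefix_sum in prefix_map:
--             count += 1
--             prefix_map.clear()
--             prefix_map.add(0)
--             prefix_sum = 0
--         else:
--             prefix_map.add(prefix_sum)
--     return count
-- ===== SOURCE B (Python) =====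
-- def max_beautiful_segments(n, a):
--     # One pass of the prefix-sum DP: best_at maps a prefix-sum value to the DP
--     # value at its latest occurrence; cur is dp[i], rolled forward.
--     prefix_sum = 0
--     best_at = {0: 0}
--     cur = 0
--     for i in range(1, n + 1):
--         prefix_sum += a[i - 1]
--         if prefix_sum in best_at:
--             cur = max(cur, best_at[prefix_sum] + 1)
--         best_at[prefix_sum] = cur
--     return cur
-- ===== Notes on version B (the rewrite author's own statement) =====
-- stated objective: alternative
-- what changed: Replaces the greedy scan that clears and rebuilds a set of segment-local prefix sums with a dynamic program over global prefix sums: one never-cleared dict maps each prefix-sum value to the DP value at its latest occurrence, and a rolling dp value is updated as dp[i] = max(dp[i-1], best_at[sum]+1).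
import Mathlib
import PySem

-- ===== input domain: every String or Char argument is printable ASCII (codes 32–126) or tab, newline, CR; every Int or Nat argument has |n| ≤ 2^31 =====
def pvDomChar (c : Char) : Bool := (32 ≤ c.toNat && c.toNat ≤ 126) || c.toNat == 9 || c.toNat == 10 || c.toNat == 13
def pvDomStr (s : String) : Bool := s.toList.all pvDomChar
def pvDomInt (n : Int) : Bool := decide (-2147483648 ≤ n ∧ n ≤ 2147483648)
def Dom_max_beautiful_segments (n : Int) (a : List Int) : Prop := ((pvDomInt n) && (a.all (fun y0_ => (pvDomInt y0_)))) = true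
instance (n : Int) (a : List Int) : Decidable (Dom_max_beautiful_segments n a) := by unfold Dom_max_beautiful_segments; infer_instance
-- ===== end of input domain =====

-- B replaces A's greedy scan (cleared set of segment-local prefix sums) by a rolling
-- dynamic program over global prefix sums with a never-cleared dict (objective: alternative).


-- ===== PORT A =====
-- 'for i in range(1, n+1)' body wrapper: propagate a[i-1] lookup (IndexError = none)
def pvTry {σ : Type} (f : σ → Int → σ) (a : List Int) (st : Option σ) (i : Int) : Option σ :=
  match st, PySem.List.pyGet? a (i-1) with
  | some s, some v => some (f s v)
  | _, _ => none

-- one iteration of A's loop body (state: prefix_sum, prefix_map, count)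
def pvStepA : Int × PySem.Set Int × Int → Int → Int × PySem.Set Int × Int
  | (ps, pm, cnt), v =>
    if PySem.Set.contains pm (ps + v) then
      (0, PySem.Set.add PySem.Set.empty 0, cnt + 1)
    else
      (ps + v, PySem.Set.add pm (ps + v), cnt)

def max_beautiful_segments (n : Int) (a : List Int) : Int :=
  match (PySem.List.pyRange 1 (n+1) 1).foldl (pvTry pvStepA a)
      (some (0, PySem.Set.add PySem.Set.empty 0, 0)) with
  | some st => st.2.2
  | none => 0   -- IndexError in Python; excluded by Pre_

-- ===== PORT B =====
-- one iteration of B's loop body (state: prefix_sum, best_at, cur)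
def pvStepB : Int × PySem.Dict Int Int × Int → Int → Int × PySem.Dict Int Int × Int
  | (ps, best, cur), v =>
    match PySem.Dict.get? best (ps + v) with
    | some w => (ps + v, PySem.Dict.insert best (ps + v) (max cur (w + 1)), max cur (w + 1))
    | none => (ps + v, PySem.Dict.insert best (ps + v) cur, cur)

def max_beautiful_segments_alt (n : Int) (a : List Int) : Int :=
  match (PySem.List.pyRange 1 (n+1) 1).foldl (pvTry pvStepB a)
      (some (0, PySem.Dict.insert PySem.Dict.empty 0 0, 0)) with
  | some st => st.2.2
  | none => 0   -- IndexError in Python; excluded by Pre_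

-- ===== PRECONDITION & SPEC =====
-- Pre_ excludes exactly the inputs where Python A raises IndexError (n > len(a)).
def Pre_max_beautiful_segments (n : Int) (a : List Int) : Prop := n ≤ (a.length : Int)
instance (n : Int) (a : List Int) : Decidable (Pre_max_beautiful_segments n a) := by
  unfold Pre_max_beautiful_segments; infer_instance

def pvWitness_max_beautiful_segments : Int × List Int := (3, [1, -1, 2])

def Spec_max_beautiful_segments (n : Int) (a : List Int) (out : Int) : Prop := out = max_beautiful_segments_alt n a
instance (n : Int) (a : List Int) (out : Int) : Decidable (Spec_max_beautiful_segments n a out) := by unfold Spec_max_beautiful_segments; infer_instance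

-- ===== CLAIM (what is proved, stated in full; the proofs are below) =====
def Claim_equal_max_beautiful_segments : Prop := ∀ (n : Int) (a : List Int), Dom_max_beautiful_segments n a → Pre_max_beautiful_segments n a → Spec_max_beautiful_segments n a (max_beautiful_segments n a)

-- ===== LEMMAS AND PROOFS =====

theorem pv_prefix_snoc (l₁ l₂ : List Int) (a : Int) : l₁ <+: l₂ ++ [a] ↔ l₁ <+: l₂ ∨ l₁ = l₂ ++ [a] := by
  have := List.prefix_concat_iff (l₁ := l₁) (l₂ := l₂) (a := a)
  tauto

theorem pv_ex_nil (c x : Int) : (∃ t, t <+: ([] : List Int) ∧ c + t.sum = x) ↔ x = c := by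
  constructor
  · rintro ⟨t, ht, hs⟩
    rw [List.prefix_nil] at ht
    subst ht; simp at hs; omega
  · rintro rfl; exact ⟨[], List.prefix_refl _, by simp⟩

theorem pv_ex_nil0 (x : Int) : (∃ t, t <+: ([] : List Int) ∧ t.sum = x) ↔ x = 0 := by
  constructor
  · rintro ⟨t, ht, hs⟩
    rw [List.prefix_nil] at ht
    subst ht; simpa using hs.symm
  · rintro rfl; exact ⟨[], List.prefix_refl _, by simp⟩

theorem pv_ex_snoc (p2 : List Int) (v c x : Int) :
    (∃ t, t <+: p2 ++ [v] ∧ c + t.sum = x) ↔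
      ((∃ t, t <+: p2 ∧ c + t.sum = x) ∨ x = c + p2.sum + v) := by
  constructor
  · rintro ⟨t, ht, hs⟩
    rcases (pv_prefix_snoc t p2 v).mp ht with h | rfl
    · exact Or.inl ⟨t, h, hs⟩
    · right; simp at hs; omega
  · rintro (⟨t, ht, hs⟩ | rfl)
    · exact ⟨t, (pv_prefix_snoc t p2 v).mpr (Or.inl ht), hs⟩
    · exact ⟨p2 ++ [v], List.prefix_refl _, by simp [List.sum_append]; ring⟩

theorem pv_ex_snoc0 (p2 : List Int) (v x : Int) :
    (∃ t, t <+: p2 ++ [v] ∧ t.sum = x) ↔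
      ((∃ t, t <+: p2 ∧ t.sum = x) ∨ x = p2.sum + v) := by
  constructor
  · rintro ⟨t, ht, hs⟩
    rcases (pv_prefix_snoc t p2 v).mp ht with h | rfl
    · exact Or.inl ⟨t, h, hs⟩
    · right; simp at hs; omega
  · rintro (⟨t, ht, hs⟩ | rfl)
    · exact ⟨t, (pv_prefix_snoc t p2 v).mpr (Or.inl ht), hs⟩
    · exact ⟨p2 ++ [v], List.prefix_refl _, by simp⟩

-- The loop over range(1, n+1) reading a[i-1] is a fold over a.take m (m = n, in range).
theorem pv_fold_range {σ : Type} (f : σ → Int → σ) (a : List Int) :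
    ∀ (m : Nat), m ≤ a.length → ∀ (s0 : σ),
    (PySem.List.pyRange 1 ((m : Int)+1) 1).foldl (pvTry f a) (some s0)
    = some ((a.take m).foldl f s0) := by
  intro m
  induction m with
  | zero => intro _ s0; simp [PySem.List.pyRange_one_eq_nil]
  | succ k ih =>
    intro hk s0
    have h1 : (1 : Int) ≤ (k : Int) + 1 := by omega
    have hcast : ((k+1 : Nat) : Int) + 1 = ((k : Int) + 1) + 1 := by push_cast; ring
    rw [hcast, PySem.List.pyRange_one_succ_right h1, List.foldl_append, ih (by omega)]
    have hget : PySem.List.pyGet? a ((k : Int) + 1 - 1) = some (a[k]'(by omega)) := by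
      have h2 : (k : Int) + 1 - 1 = (k : Int) := by ring
      rw [h2, PySem.List.pyGet?_natCast, List.getElem?_eq_getElem (by omega)]
    simp only [List.foldl_cons, List.foldl_nil, pvTry, hget]
    have htake : a.take k ++ [a[k]'(by omega)] = a.take (k+1) := by
      have h3 := List.take_concat_get (l := a) (i := k) (by omega)
      rw [List.concat_eq_append] at h3
      exact h3
    rw [← htake, List.foldl_append]
    rfl

-- The bisimulation invariant between A's and B's loop states after processing p1 ++ p2,
-- where p2 are the elements since A's last reset.
def pvInv (p1 p2 : List Int) (S : PySem.Set Int) (d : PySem.Dict Int Int) (cnt : Int) : Prop :=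
  (∀ x : Int, x ∈ S ↔ ∃ t, t <+: p2 ∧ t.sum = x) ∧
  (∀ s' v, d.get? s' = some v →
      ((∃ t, t <+: p2 ∧ p1.sum + t.sum = s') → v = cnt) ∧
      ((¬ ∃ t, t <+: p2 ∧ p1.sum + t.sum = s') → v + 1 ≤ cnt)) ∧
  (∀ s' : Int, (∃ q, q <+: (p1 ++ p2) ∧ q.sum = s') → (d.get? s').isSome = true)

theorem pv_main : ∀ (l p1 p2 : List Int) (S : PySem.Set Int) (d : PySem.Dict Int Int)
    (cnt sA sB : Int), sA = p2.sum → sB = (p1 ++ p2).sum →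
    pvInv p1 p2 S d cnt →
    (l.foldl pvStepA (sA, S, cnt)).2.2 = (l.foldl pvStepB (sB, d, cnt)).2.2 := by
  intro l
  induction l with
  | nil => intro p1 p2 S d cnt sA sB _ _ _; rfl
  | cons v l ih =>
    intro p1 p2 S d cnt sA sB hsA hsB hInv
    obtain ⟨hS, hD, hK⟩ := hInv
    subst hsA hsB
    simp only [List.foldl_cons]
    by_cases hit : ∃ t, t <+: p2 ∧ t.sum = p2.sum + v
    · -- A closes a segment here; B's dict holds the matching prefix with value cnt
      have hc : PySem.Set.contains S (p2.sum + v) = true :=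
        (PySem.Set.contains_iff S _).mpr ((hS _).mpr hit)
      have hA : pvStepA (p2.sum, S, cnt) v = (0, PySem.Set.add PySem.Set.empty 0, cnt + 1) := by
        simp only [pvStepA, hc]; simp
      obtain ⟨t, ht, hts⟩ := hit
      have hkey : (d.get? ((p1 ++ p2).sum + v)).isSome = true := by
        apply hK
        refine ⟨p1 ++ t, (List.prefix_append_right_inj p1).mpr ht, ?_⟩
        simp only [List.sum_append]; omega
      obtain ⟨w, hw⟩ := Option.isSome_iff_exists.mp hkey
      have hwv : w = cnt := by
        refine (hD _ _ hw).1 ⟨t, ht, ?_⟩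
        simp only [List.sum_append]; omega
      have hmax : max cnt (cnt + 1) = cnt + 1 := max_eq_right (by omega)
      have hB : pvStepB ((p1 ++ p2).sum, d, cnt) v
          = ((p1 ++ p2).sum + v, d.insert ((p1 ++ p2).sum + v) (cnt + 1), cnt + 1) := by
        simp only [pvStepB, hw, hwv, hmax]
      rw [hA, hB]
      refine ih (p1 ++ p2 ++ [v]) [] (PySem.Set.add PySem.Set.empty 0)
          (d.insert ((p1 ++ p2).sum + v) (cnt + 1)) (cnt + 1) _ _ (by simp)
          (by simp only [List.sum_append, List.sum_cons, List.sum_nil]; ring) ⟨?_, ?_, ?_⟩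
      · intro x
        rw [pv_ex_nil0]
        simp [PySem.Set.empty]
      · intro s' w' hw'
        have hcond : (∃ t', t' <+: ([] : List Int) ∧ (p1 ++ p2 ++ [v]).sum + t'.sum = s')
            ↔ s' = (p1 ++ p2).sum + v := by
          rw [pv_ex_nil]
          simp only [List.sum_append, List.sum_cons, List.sum_nil]
          omega
        rw [PySem.Dict.get?_insert] at hw'
        by_cases he : s' = (p1 ++ p2).sum + v
        · rw [if_pos he] at hw'
          injection hw' with h
          exact ⟨fun _ => h.symm, fun hcn => absurd (hcond.mpr he) hcn⟩
        · rw [if_neg he] at hw'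
          refine ⟨fun hcn => absurd (hcond.mp hcn) he, fun _ => ?_⟩
          rcases em (∃ t', t' <+: p2 ∧ p1.sum + t'.sum = s') with hc' | hc'
          · have := (hD _ _ hw').1 hc'; omega
          · have := (hD _ _ hw').2 hc'; omega
      · intro s' hq
        obtain ⟨q, hq, hqs⟩ := hq
        rw [List.append_nil] at hq
        rw [PySem.Dict.get?_insert]
        by_cases he : s' = (p1 ++ p2).sum + v
        · rw [if_pos he]; rfl
        · rw [if_neg he]
          rcases (pv_prefix_snoc q (p1 ++ p2) v).mp hq with hq' | rfl
          · exact hK s' ⟨q, hq', hqs⟩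
          · exfalso; apply he; rw [← hqs]; simp only [List.sum_append, List.sum_cons, List.sum_nil]; ring
    · -- no segment ends here: A extends its set; B's dict value for this sum (if any) is stale
      have hc : PySem.Set.contains S (p2.sum + v) = false := by
        rw [Bool.eq_false_iff, Ne, PySem.Set.contains_iff S, hS]; exact hit
      have hA : pvStepA (p2.sum, S, cnt) v
          = (p2.sum + v, PySem.Set.add S (p2.sum + v), cnt) := by
        simp only [pvStepA, hc]; simp
      have hB : pvStepB ((p1 ++ p2).sum, d, cnt) v
          = ((p1 ++ p2).sum + v, d.insert ((p1 ++ p2).sum + v) cnt, cnt) := by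
        cases hw : d.get? ((p1 ++ p2).sum + v) with
        | none => simp only [pvStepB, hw]
        | some w =>
          have hstale : w + 1 ≤ cnt := by
            refine (hD _ _ hw).2 ?_
            rintro ⟨t', ht', hts'⟩
            refine hit ⟨t', ht', ?_⟩
            simp at hts'
            omega
          have hmax : max cnt (w + 1) = cnt := max_eq_left (by omega)
          simp only [pvStepB, hw, hmax]
      rw [hA, hB]
      refine ih p1 (p2 ++ [v]) (PySem.Set.add S (p2.sum + v))
          (d.insert ((p1 ++ p2).sum + v) cnt) cnt _ _ (by simp)
          (by simp only [List.sum_append, List.sum_cons, List.sum_nil]; ring) ⟨?_, ?_, ?_⟩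
      · intro x
        rw [PySem.Set.mem_add, pv_ex_snoc0, hS]
      · intro s' w' hw'
        have hcond : (∃ t', t' <+: (p2 ++ [v]) ∧ p1.sum + t'.sum = s')
            ↔ ((∃ t', t' <+: p2 ∧ p1.sum + t'.sum = s') ∨ s' = (p1 ++ p2).sum + v) := by
          rw [pv_ex_snoc, List.sum_append]
        rw [PySem.Dict.get?_insert] at hw'
        by_cases he : s' = (p1 ++ p2).sum + v
        · rw [if_pos he] at hw'
          injection hw' with h
          exact ⟨fun _ => h.symm, fun hcn => absurd (hcond.mpr (Or.inr he)) hcn⟩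
        · rw [if_neg he] at hw'
          constructor
          · intro hcn
            rcases hcond.mp hcn with hc' | hc'
            · exact (hD _ _ hw').1 hc'
            · exact absurd hc' he
          · intro hcn
            refine (hD _ _ hw').2 ?_
            rintro ⟨t', ht', hts'⟩
            exact hcn (hcond.mpr (Or.inl ⟨t', ht', hts'⟩))
      · intro s' hq
        obtain ⟨q, hq, hqs⟩ := hq
        rw [← List.append_assoc] at hq
        rw [PySem.Dict.get?_insert]
        by_cases he : s' = (p1 ++ p2).sum + v
        · rw [if_pos he]; rfl
        · rw [if_neg he]
          rcases (pv_prefix_snoc q (p1 ++ p2) v).mp hq with hq' | rfl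
          · exact hK s' ⟨q, hq', hqs⟩
          · exfalso; apply he; rw [← hqs]; simp only [List.sum_append, List.sum_cons, List.sum_nil]; ring

theorem pv_inv_init :
    pvInv [] [] (PySem.Set.add PySem.Set.empty 0) (PySem.Dict.insert PySem.Dict.empty 0 0) 0 := by
  refine ⟨?_, ?_, ?_⟩
  · intro x
    rw [pv_ex_nil0]
    simp [PySem.Set.empty]
  · intro s' v hv
    rw [PySem.Dict.get?_insert] at hv
    by_cases he : s' = 0
    · rw [if_pos he] at hv
      injection hv with h
      refine ⟨fun _ => h.symm, fun hcn => absurd ?_ hcn⟩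
      exact ⟨[], List.prefix_refl _, by simp [he]⟩
    · rw [if_neg he, PySem.Dict.get?_empty] at hv
      exact absurd hv (by simp)
  · intro s' hq
    obtain ⟨q, hq, hqs⟩ := hq
    rw [List.append_nil, List.prefix_nil] at hq
    subst hq
    simp only [List.sum_nil] at hqs
    rw [PySem.Dict.get?_insert, if_pos hqs.symm]
    rfl

-- ===== VERDICT (by name: the statement is the Claim_ definition above) =====
theorem max_beautiful_segments_spec : Claim_equal_max_beautiful_segments := by
  unfold Claim_equal_max_beautiful_segments
  intro n a _ hPre
  unfold Spec_max_beautiful_segments max_beautiful_segments max_beautiful_segments_alt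
  by_cases hn : n ≤ 0
  · rw [PySem.List.pyRange_one_eq_nil (by omega)]
    rfl
  · have hm : n = ((n.toNat : Nat) : Int) := by omega
    have hlen : n.toNat ≤ a.length := by
      unfold Pre_max_beautiful_segments at hPre; omega
    rw [hm, pv_fold_range pvStepA a n.toNat hlen, pv_fold_range pvStepB a n.toNat hlen]
    exact pv_main (a.take n.toNat) [] [] (PySem.Set.add PySem.Set.empty 0)
        (PySem.Dict.insert PySem.Dict.empty 0 0) 0 0 0 (by simp) (by simp) pv_inv_init
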